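-- pv_equiv track=rewrite | github.com/Bili345679/Compare_screen_delay | compare_screen_delay.py | format_ms_progress
-- ===== SOURCE A (Python) =====
-- def format_ms_progress(n):
--     result = []
--     for i in range(10):
--         row = []
--         for j in range(10):
--             if n > 0:
--                 row.append(f"{j} {'#' * min(10, n)}{'.' * max(0, 10 - n)}")
--                 n -= 10
--             else:
--                 row.append(f"{j} {'.' * 10}")
--         row.append("10")
--         result.append(" ".join(row))
--     return "\n".join(result)
-- ===== SOURCE B (Python) =====
-- def format_ms_progress(n):
--     # Thermometer view: total fill is clamp(n, 0, 1000); divmod gives q full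
--     # bars, one partial bar of r hashes, and all-dot bars for the rest.
--     t = max(0, min(1000, n))
--     q, r = divmod(t, 10)
--     bars = ["#" * 10] * q
--     if r:
--         bars.append("#" * r + "." * (10 - r))
--     bars += ["." * 10] * (100 - len(bars))
--     rows = []
--     for i in range(10):
--         cells = [f"{j} {bar}" for j, bar in enumerate(bars[10 * i:10 * i + 10])]
--         rows.append(" ".join(cells + ["10"]))
--     return "\n".join(rows)
-- ===== Notes on version B (the rewrite author's own statement) =====
-- stated objective: alternative
-- what changed: A walks every grid cell threading a mutated counter and branching per cell; B never iterates cells at all: it clamps the total fill to the drawable range, one divmod yields (full bars, partial hashes), the bar list is built by list replication and concatenation, and is then reshaped into labelled rows by slicing and enumerate.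
import Mathlib
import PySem

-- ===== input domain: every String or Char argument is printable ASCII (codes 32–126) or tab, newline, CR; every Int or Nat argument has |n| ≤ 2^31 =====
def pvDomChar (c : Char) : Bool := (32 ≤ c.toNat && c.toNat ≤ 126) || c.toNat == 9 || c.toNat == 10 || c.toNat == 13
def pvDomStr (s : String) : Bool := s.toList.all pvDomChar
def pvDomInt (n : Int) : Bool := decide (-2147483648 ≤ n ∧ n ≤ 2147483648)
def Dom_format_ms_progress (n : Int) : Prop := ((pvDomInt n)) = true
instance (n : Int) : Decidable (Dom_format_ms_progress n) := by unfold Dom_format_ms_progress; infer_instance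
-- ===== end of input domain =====

-- B replaces A's per-cell branch-and-decrement walk over the 10x10 grid by a thermometer
-- view: clamp the total fill to the drawable range, one divmod gives (full bars, partial hashes), the
-- bar list is built by replication+concatenation and reshaped by slicing; objective: alternative.

-- ===== PORT A =====
-- shared primitive: Python's  str * int  ('' for non-positive counts)
def pvRep (s : String) (k : Int) : String := PySem.Str.join "" (List.replicate k.toNat s)

-- one step of A's inner loop over j: state = (row so far, current n)
def pvStepA (rs : List String × Int) (j : Int) : List String × Int :=
  if rs.2 > 0 then
    (rs.1 ++ [PySem.Int.toStr j ++ " " ++ pvRep "#" (min 10 rs.2) ++ pvRep "." (max 0 (10 - rs.2))],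
     rs.2 - 10)
  else
    (rs.1 ++ [PySem.Int.toStr j ++ " " ++ pvRep "." 10], rs.2)

-- one step of A's outer loop over i: state = (result so far, current n)
def pvStepOutA (st : List String × Int) (_i : Int) : List String × Int :=
  let inner := (PySem.List.pyRange 0 10 1).foldl pvStepA ([], st.2)
  (st.1 ++ [PySem.Str.join " " (inner.1 ++ ["10"])], inner.2)

def format_ms_progress (n : Int) : String :=
  PySem.Str.join "\n" (((PySem.List.pyRange 0 10 1).foldl pvStepOutA ([], n)).1)

-- ===== PORT B =====
-- the 100-bar list: q full bars, one partial bar of r hashes (if r ≠ 0), dot filler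
def pvBarsB (n : Int) : List String :=
  let t := max 0 (min 1000 n)
  let q := PySem.Int.floordiv t 10
  let r := PySem.Int.mod t 10
  let bars := List.replicate q.toNat (pvRep "#" 10) ++
    (if r ≠ 0 then [pvRep "#" r ++ pvRep "." (10 - r)] else [])
  bars ++ List.replicate (100 - bars.length) (pvRep "." 10)

-- one output row: slice ten bars, label them by enumerate, append "10", join
def pvRowB (bars : List String) (i : Int) : String :=
  PySem.Str.join " "
    (((PySem.List.enumerate (PySem.List.slice bars (some (10 * i)) (some (10 * i + 10)))).map
        (fun p => PySem.Int.toStr p.1 ++ " " ++ p.2)) ++ ["10"])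

def format_ms_progress_alt (n : Int) : String :=
  let bars := pvBarsB n
  PySem.Str.join "\n" ((PySem.List.pyRange 0 10 1).map (pvRowB bars))

-- ===== PRECONDITION & SPEC =====
def Spec_format_ms_progress (n : Int) (out : String) : Prop := out = format_ms_progress_alt n
instance (n : Int) (out : String) : Decidable (Spec_format_ms_progress n out) := by unfold Spec_format_ms_progress; infer_instance

-- ===== CLAIM (what is proved, stated in full; the proofs are below) =====
def Claim_equal_format_ms_progress : Prop := ∀ (n : Int), Dom_format_ms_progress n → Spec_format_ms_progress n (format_ms_progress n)

-- ===== LEMMAS AND PROOFS =====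

-- abstract bar for remaining fill `rem`, and the cell both sides produce
def pvBarOf (rem : Int) : String :=
  if rem > 0 then pvRep "#" (min 10 rem) ++ pvRep "." (max 0 (10 - rem)) else pvRep "." 10

def pvCell (n r j : Int) : String :=
  PySem.Int.toStr j ++ " " ++ pvBarOf (n - 10 * (10 * r + j))

def pvRow (n r : Int) : String :=
  PySem.Str.join " " ((PySem.List.pyRange 0 10 1).map (pvCell n r) ++ ["10"])

theorem pvBarOf_full {rem : Int} (h : 10 ≤ rem) : pvBarOf rem = pvRep "#" 10 := by
  unfold pvBarOf
  rw [if_pos (by omega)]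
  have h1 : min 10 rem = 10 := by omega
  have h2 : max 0 (10 - rem) = 0 := by omega
  rw [h1, h2]
  show _ ++ pvRep "." 0 = _
  have : pvRep "." 0 = "" := rfl
  rw [this, String.append_empty]

theorem pvBarOf_mid {rem : Int} (h1 : 0 < rem) (h2 : rem < 10) :
    pvBarOf rem = pvRep "#" rem ++ pvRep "." (10 - rem) := by
  unfold pvBarOf
  rw [if_pos (by omega)]
  have hm : min 10 rem = rem := by omega
  have hM : max 0 (10 - rem) = 10 - rem := by omega
  rw [hm, hM]

theorem pvBarOf_dots {rem : Int} (h : rem ≤ 0) : pvBarOf rem = pvRep "." 10 := by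
  unfold pvBarOf
  rw [if_neg (by omega)]

-- A-side: inner loop emits exactly the abstract cells (invariant on the threaded counter)
theorem pv_inner_eq (c : Nat) : ∀ (j s : Int) (acc : List String) (n r : Int),
    (0 < n - 10 * (10 * r + j) → s = n - 10 * (10 * r + j)) →
    (n - 10 * (10 * r + j) ≤ 0 → s ≤ 0) →
    ((PySem.List.pyRange j (j + (c : Int)) 1).foldl pvStepA (acc, s)).1
        = acc ++ (PySem.List.pyRange j (j + (c : Int)) 1).map (pvCell n r)
    ∧ (0 < n - 10 * (10 * r + (j + (c : Int))) →
        ((PySem.List.pyRange j (j + (c : Int)) 1).foldl pvStepA (acc, s)).2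
          = n - 10 * (10 * r + (j + (c : Int))))
    ∧ (n - 10 * (10 * r + (j + (c : Int))) ≤ 0 →
        ((PySem.List.pyRange j (j + (c : Int)) 1).foldl pvStepA (acc, s)).2 ≤ 0) := by
  induction c with
  | zero =>
    intro j s acc n r h1 h2
    push_cast
    rw [PySem.List.pyRange_one_eq_nil (by omega)]
    simp only [List.foldl_nil, List.map_nil, List.append_nil, add_zero]
    exact ⟨trivial, h1, h2⟩
  | succ c ih =>
    intro j s acc n r h1 h2
    push_cast
    rw [PySem.List.pyRange_one_cons (by omega : j < j + ((c : Int) + 1))]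
    by_cases hrem : 0 < n - 10 * (10 * r + j)
    · have hs : s = n - 10 * (10 * r + j) := h1 hrem
      have hstep : pvStepA (acc, s) j = (acc ++ [pvCell n r j], s - 10) := by
        simp only [pvStepA, pvCell, pvBarOf]
        rw [if_pos (by omega : (acc, s).2 > 0), if_pos (by omega : n - 10 * (10 * r + j) > 0)]
        simp [hs, String.append_assoc]
      rw [List.foldl_cons, hstep]
      have := ih (j + 1) (s - 10) (acc ++ [pvCell n r j]) n r
        (by intro _; omega) (by intro _; omega)
      have harith : j + 1 + (c : Int) = j + ((c : Int) + 1) := by ring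
      rw [harith] at this
      refine ⟨?_, this.2.1, this.2.2⟩
      rw [this.1, List.append_assoc]
      rfl
    · have hs : s ≤ 0 := h2 (by omega)
      have hstep : pvStepA (acc, s) j = (acc ++ [pvCell n r j], s) := by
        simp only [pvStepA, pvCell, pvBarOf]
        rw [if_neg (by omega : ¬ (acc, s).2 > 0), if_neg (by omega : ¬ n - 10 * (10 * r + j) > 0)]
      rw [List.foldl_cons, hstep]
      have := ih (j + 1) s (acc ++ [pvCell n r j]) n r
        (by intro h; omega) (by intro _; exact hs)
      have harith : j + 1 + (c : Int) = j + ((c : Int) + 1) := by ring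
      rw [harith] at this
      refine ⟨?_, this.2.1, this.2.2⟩
      rw [this.1, List.append_assoc]
      rfl

-- A-side: outer loop emits exactly the abstract rows
theorem pv_outer_eq (c : Nat) : ∀ (r s : Int) (acc : List String) (n : Int),
    (0 < n - 100 * r → s = n - 100 * r) →
    (n - 100 * r ≤ 0 → s ≤ 0) →
    ((PySem.List.pyRange r (r + (c : Int)) 1).foldl pvStepOutA (acc, s)).1
        = acc ++ (PySem.List.pyRange r (r + (c : Int)) 1).map (pvRow n) := by
  induction c with
  | zero =>
    intro r s acc n h1 h2
    push_cast
    rw [PySem.List.pyRange_one_eq_nil (by omega)]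
    simp
  | succ c ih =>
    intro r s acc n h1 h2
    push_cast
    rw [PySem.List.pyRange_one_cons (by omega : r < r + ((c : Int) + 1))]
    have hinner := pv_inner_eq 10 0 s [] n r
      (by intro h; rw [h1 (by omega)]; ring) (by intro h; exact h2 (by omega))
    rw [(by norm_num : (0 : Int) + ((10 : Nat) : Int) = 10)] at hinner
    have hstep : pvStepOutA (acc, s)  r
        = (acc ++ [pvRow n r], ((PySem.List.pyRange 0 10 1).foldl pvStepA ([], s)).2) := by
      simp only [pvStepOutA, pvRow]
      rw [hinner.1]
      rfl
    rw [List.foldl_cons, hstep]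
    have h1' : 0 < n - 100 * (r + 1) →
        ((PySem.List.pyRange 0 10 1).foldl pvStepA ([], s)).2 = n - 100 * (r + 1) := by
      intro h
      have := hinner.2.1 (by omega)
      omega
    have h2' : n - 100 * (r + 1) ≤ 0 →
        ((PySem.List.pyRange 0 10 1).foldl pvStepA ([], s)).2 ≤ 0 := by
      intro h
      exact hinner.2.2 (by omega)
    have := ih (r + 1) _ (acc ++ [pvRow n r]) n h1' h2'
    have harith : r + 1 + (c : Int) = r + ((c : Int) + 1) := by ring
    rw [harith] at this
    rw [this, List.append_assoc]
    rfl

theorem pvA_eq_rows (n : Int) :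
    format_ms_progress n = PySem.Str.join "\n" ((PySem.List.pyRange 0 10 1).map (pvRow n)) := by
  unfold format_ms_progress
  have := pv_outer_eq 10 0 n [] n (by intro _; ring) (by intro _; omega)
  rw [(by norm_num : (0 : Int) + ((10 : Nat) : Int) = 10)] at this
  rw [this]
  rfl

-- B-side: the replicated bar list equals the abstract per-index bars
theorem pvBarsB_eq (n : Int) :
    pvBarsB n = (List.range 100).map (fun (k : Nat) => pvBarOf (n - 10 * (k : Int))) := by
  have h10 : (0 : Int) < 10 := by norm_num
  unfold pvBarsB
  simp only [PySem.Int.floordiv_eq_ediv_of_pos h10, PySem.Int.mod_eq_emod_of_pos h10]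
  set t := max 0 (min 1000 n) with ht
  set q := t / 10 with hq
  set r := t % 10 with hrdef
  have hqr : 10 * q + r = t := by rw [hq, hrdef]; exact Int.mul_ediv_add_emod t 10
  have hr0 : 0 ≤ r := Int.emod_nonneg t (by norm_num)
  have hr10 : r < 10 := Int.emod_lt_of_pos t h10
  have hq0 : 0 ≤ q := Int.ediv_nonneg (by omega) (by norm_num)
  have hqn : (q.toNat : Int) = q := Int.toNat_of_nonneg hq0
  by_cases hr : r = 0
  · rw [if_neg (by simp [hr])]
    apply List.ext_getElem
    · simp only [List.append_nil, List.length_append, List.length_replicate, List.length_map, List.length_range]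
      omega
    · intro k h1 h2
      simp only [List.length_map, List.length_range] at h2
      simp only [List.getElem_map, List.getElem_range]
      by_cases hk : k < q.toNat
      · rw [List.getElem_append_left (by simpa using hk)]
        simp only [List.append_nil, List.getElem_replicate]
        exact (pvBarOf_full (by omega)).symm
      · rw [List.getElem_append_right (by simpa using hk)]
        simp only [List.getElem_replicate]
        exact (pvBarOf_dots (by omega)).symm
  · rw [if_pos hr]
    apply List.ext_getElem
    · simp only [List.length_append, List.length_replicate, List.length_singleton, List.length_map, List.length_range]
      omega
    · intro k h1 h2
      simp only [List.length_map, List.length_range] at h2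
      simp only [List.getElem_map, List.getElem_range]
      by_cases hk : k < q.toNat
      · rw [List.getElem_append_left
            (by simp only [List.length_append, List.length_replicate, List.length_singleton]; omega),
          List.getElem_append_left (by simpa using hk)]
        simp only [List.getElem_replicate]
        exact (pvBarOf_full (by omega)).symm
      · by_cases hk2 : k = q.toNat
        · rw [List.getElem_append_left
              (by simp only [List.length_append, List.length_replicate, List.length_singleton]; omega),
            List.getElem_append_right (by simpa using hk)]
          simp only [List.length_replicate, List.getElem_singleton]
          have harg : n - 10 * (k : Int) = r := by omega
          rw [harg, pvBarOf_mid (by omega) hr10]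
        · rw [List.getElem_append_right
              (by simp only [List.length_append, List.length_replicate, List.length_singleton]; omega)]
          simp only [List.getElem_replicate]
          exact (pvBarOf_dots (by omega)).symm

-- B-side: each row equals the abstract row
theorem pvRowB_eq (n r : Int) (h0 : 0 ≤ r) (h10 : r < 10) :
    pvRowB (pvBarsB n) r = pvRow n r := by
  have hrn : ((r.toNat : Int)) = r := Int.toNat_of_nonneg h0
  set rn := r.toNat with hrnd
  have hrn10 : rn < 10 := by omega
  unfold pvRowB pvRow
  rw [pvBarsB_eq]
  -- the slice picks out bars 10*rn .. 10*rn+9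
  have hslice : PySem.List.slice ((List.range 100).map (fun (k : Nat) => pvBarOf (n - 10 * (k : Int))))
      (some (10 * r)) (some (10 * r + 10))
      = (List.range 10).map (fun (j : Nat) => pvBarOf (n - 10 * ((10 * rn + j : Nat) : Int))) := by
    rw [PySem.List.slice_toNat _ (by omega) (by omega)]
    have h1 : (10 * r).toNat = 10 * rn := by omega
    have h2 : (10 * r + 10).toNat = 10 * rn + 10 := by omega
    rw [h1, h2, ← List.map_drop, ← List.map_take]
    have hseg : (List.take (10 * rn + 10 - 10 * rn) (List.drop (10 * rn) (List.range 100)))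
        = (List.range 10).map (fun (j : Nat) => 10 * rn + j) := by
      interval_cases rn <;> decide
    rw [hseg, List.map_map]
    rfl
  rw [hslice]
  congr 1
  rw [PySem.List.enumerate_eq_map_pyRange _ ""]
  simp only [PySem.List.len, List.length_map, List.length_range]
  simp only [List.length_map, List.length_range, List.map_map]
  show ((PySem.List.pyRange 0 10 1).map _) ++ _ = ((PySem.List.pyRange 0 10 1).map _) ++ _
  congr 1
  apply List.map_congr_left
  intro j hj
  rw [PySem.List.mem_pyRange_one] at hj
  simp only [Function.comp]
  have hget : PySem.List.pyGetD
      ((List.range 10).map (fun (j : Nat) => pvBarOf (n - 10 * ((10 * rn + j : Nat) : Int)))) j ""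
      = pvBarOf (n - 10 * ((10 * rn + j.toNat : Nat) : Int)) := by
    rw [PySem.List.pyGetD_eq_getElem _ "" hj.1 (by simp; omega)]
    simp
  rw [hget]
  unfold pvCell
  have harg : n - 10 * ((10 * rn + j.toNat : Nat) : Int) = n - 10 * (10 * r + j) := by
    push_cast
    omega
  rw [harg]

-- ===== VERDICT (by name: the statement is the Claim_ definition above) =====
theorem format_ms_progress_spec : Claim_equal_format_ms_progress := by
  intro n _
  show format_ms_progress n = format_ms_progress_alt n
  rw [pvA_eq_rows]
  show _ = PySem.Str.join "\n" ((PySem.List.pyRange 0 10 1).map (pvRowB (pvBarsB n)))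
  have hmap : (PySem.List.pyRange 0 10 1).map (pvRowB (pvBarsB n))
      = (PySem.List.pyRange 0 10 1).map (pvRow n) :=
    List.map_congr_left (fun r hr => by
      rw [PySem.List.mem_pyRange_one] at hr
      exact pvRowB_eq n r hr.1 hr.2)
  rw [hmap]
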